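-- pv_equiv track=rewrite | github.com/Frodez/InterProactiveRoadServiceCache | src/commons/evaluation_util.py | lifetimeEvaluate
-- ===== SOURCE A (Python) =====
-- from copy import deepcopy
-- from typing import List, Set, Tuple
--
-- def lifetimeEvaluate(cachedContents: List[Set[int]], requestContents: List[int]) -> Tuple[int, int]:
--     lifetimeHit = 0
--     lifetimeMissed = 0
--     cachedContents = deepcopy(cachedContents)
--     length = len(cachedContents)
--     for index in range(0, length):
--         for content in cachedContents[index]:
--             hit = 0
--             for epoch in range(index + 1, length):
--                 if requestContents[epoch - 1] == content:
--                     hit = hit + 1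
--                 if content not in cachedContents[epoch]:
--                     break
--                 else:
--                     cachedContents[epoch].remove(content)
--             if hit != 0:
--                 lifetimeHit = lifetimeHit + 1
--             else:
--                 lifetimeMissed = lifetimeMissed + 1
--     return lifetimeHit, lifetimeMissed
-- ===== SOURCE B (Python) =====
-- def lifetimeEvaluate(cachedContents, requestContents):
--     length = len(cachedContents)
--     hit = 0
--     miss = 0
--     prev = ()
--     for j, cur in enumerate(cachedContents):
--         for c in cur:
--             if c in prev:
--                 continue  # c's lifetime block started earlier
--             # c starts a lifetime block at j; it is a hit iff some epoch k
--             # in the block's request window has requestContents[k] == c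
--             k = j
--             ok = False
--             while k <= length - 2 and c in cachedContents[k]:
--                 if requestContents[k] == c:
--                     ok = True
--                     break
--                 k += 1
--             if ok:
--                 hit += 1
--             else:
--                 miss += 1
--         prev = cur
--     return hit, miss
-- ===== Notes on version B (the rewrite author's own statement) =====
-- stated objective: alternative
-- what changed: A deep-copies the cache and destructively consumes each content from consecutive epochs while counting matches; B never mutates anything: it detects each lifetime-block start as 'content absent from the previous epoch' and decides hit/miss by a forward scan over the original list with the combined condition 'k <= length-2 and content still cached at k'.
import Mathlib
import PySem

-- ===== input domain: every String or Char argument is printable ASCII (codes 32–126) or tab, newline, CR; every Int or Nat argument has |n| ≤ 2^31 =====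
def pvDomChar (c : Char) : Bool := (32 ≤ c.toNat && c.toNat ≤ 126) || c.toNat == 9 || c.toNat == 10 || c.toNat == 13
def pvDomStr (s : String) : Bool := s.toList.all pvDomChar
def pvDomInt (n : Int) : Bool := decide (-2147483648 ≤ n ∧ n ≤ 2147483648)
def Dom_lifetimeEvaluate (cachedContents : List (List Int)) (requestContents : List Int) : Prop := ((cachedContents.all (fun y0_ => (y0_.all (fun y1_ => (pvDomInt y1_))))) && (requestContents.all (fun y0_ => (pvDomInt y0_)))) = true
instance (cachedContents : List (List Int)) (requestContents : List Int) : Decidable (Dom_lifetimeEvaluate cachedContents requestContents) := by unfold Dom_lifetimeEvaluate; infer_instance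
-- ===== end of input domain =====

-- B replaces A's deepcopy-and-consume loop by a mutation-free scan: a content starts a
-- lifetime block iff it is absent from the previous epoch, and the block is a hit iff a
-- forward scan over the ORIGINAL list finds a matching request while the content stays cached.

-- ===== PORT A =====
-- inner 'for epoch in range(index+1, length)' loop with break; state = (cached, hit)
-- requestContents[epoch-1] is in range under Pre_; Python raises IndexError otherwise.
def innerA (req : List Int) (c : Int) : List Nat → List (List Int) × Int → List (List Int) × Int
  | [], st => st
  | e :: es, (cached, h) =>
      let h' : Int := if req.getD (e - 1) 0 = c then h + 1 else h
      let t := cached.getD e []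
      if c ∈ t then innerA req c es (cached.set e (t.erase c), h')
      else (cached, h')

-- 'for content in cachedContents[index]' loop; state = (cached, lifetimeHit, lifetimeMissed)
def setLoopA (req : List Int) (len i : Nat) : List Int → List (List Int) × Int × Int → List (List Int) × Int × Int
  | [], st => st
  | c :: cs, (cached, hit, miss) =>
      let r := innerA req c (List.range' (i + 1) (len - (i + 1))) (cached, 0)
      setLoopA req len i cs (if r.2 ≠ 0 then (r.1, hit + 1, miss) else (r.1, hit, miss + 1))

-- 'for index in range(0, length)' loop
def outerA (req : List Int) (len : Nat) : List Nat → List (List Int) × Int × Int → List (List Int) × Int × Int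
  | [], st => st
  | i :: is, st => outerA req len is (setLoopA req len i (st.1.getD i []) st)

def lifetimeEvaluate (cachedContents : List (List Int)) (requestContents : List Int) : Int × Int :=
  let st := outerA requestContents cachedContents.length (List.range cachedContents.length) (cachedContents, 0, 0)
  (st.2.1, st.2.2)

-- ===== PORT B =====
-- the 'while k <= length-2 and c in cachedContents[k]' scan of Source B
-- requestContents[k] is in range under Pre_; Python raises IndexError otherwise.
def scanB (C : List (List Int)) (req : List Int) (c : Int) (k : Nat) : Bool :=
  if h : k + 2 ≤ C.length ∧ c ∈ C.getD k [] then
    (if req.getD k 0 = c then true else scanB C req c (k + 1))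
  else false
termination_by C.length - k
decreasing_by omega

-- the 'for j, cur in enumerate(cachedContents)' loop of Source B, threading (prev, hit, miss)
def goB (C : List (List Int)) (req : List Int) : List Int → Nat → List (List Int) → Int × Int → Int × Int
  | _, _, [], acc => acc
  | prev, j, cur :: rest, acc =>
      goB C req cur (j + 1) rest
        (cur.foldl (fun acc c =>
          if c ∈ prev then acc
          else if scanB C req c j then (acc.1 + 1, acc.2) else (acc.1, acc.2 + 1)) acc)

def lifetimeEvaluate_alt (cachedContents : List (List Int)) (requestContents : List Int) : Int × Int :=
  goB cachedContents requestContents [] 0 cachedContents (0, 0)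

-- ===== PRECONDITION & SPEC =====
-- Pre_ requires (a) each cached epoch to hold DISTINCT elements — the Python argument is a
-- list of sets, so every Python-representable input satisfies this — and (b) that no
-- nonempty epoch at index j ∈ [len(requestContents), length-2] exists: on exactly those
-- inputs Python A raises IndexError reading requestContents[j].
def Pre_lifetimeEvaluate (cachedContents : List (List Int)) (requestContents : List Int) : Prop :=
  (∀ s ∈ cachedContents, s.Nodup) ∧
  (∀ j < cachedContents.length - 1, cachedContents.getD j [] ≠ [] → j < requestContents.length)
instance (cachedContents : List (List Int)) (requestContents : List Int) : Decidable (Pre_lifetimeEvaluate cachedContents requestContents) := by unfold Pre_lifetimeEvaluate; infer_instance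

def pvWitness_lifetimeEvaluate : List (List Int) × List Int := ([[1, 2], [2]], [2, 5])

def Spec_lifetimeEvaluate (cachedContents : List (List Int)) (requestContents : List Int) (out : Int × Int) : Prop := out = lifetimeEvaluate_alt cachedContents requestContents
instance (cachedContents : List (List Int)) (requestContents : List Int) (out : Int × Int) : Decidable (Spec_lifetimeEvaluate cachedContents requestContents out) := by unfold Spec_lifetimeEvaluate; infer_instance

-- ===== CLAIM (what is proved, stated in full; the proofs are below) =====
def Claim_equal_lifetimeEvaluate : Prop := ∀ (cachedContents : List (List Int)) (requestContents : List Int), Dom_lifetimeEvaluate cachedContents requestContents → Pre_lifetimeEvaluate cachedContents requestContents → Spec_lifetimeEvaluate cachedContents requestContents (lifetimeEvaluate cachedContents requestContents)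

-- ===== LEMMAS AND PROOFS =====

-- stripOne c ts: remove c from the longest prefix of ts in which c is present —
-- exactly the removals A's inner loop performs on the suffix of the cache.
def stripOne (c : Int) : List (List Int) → List (List Int)
  | [] => []
  | t :: ts => if c ∈ t then t.erase c :: stripOne c ts else t :: ts

def stripAll (S : List Int) (ts : List (List Int)) : List (List Int) :=
  S.foldl (fun ts c => stripOne c ts) ts

-- the hit counter A's inner loop accumulates, phrased over the cache suffix from index k+1
def hitCnt (req : List Int) (c : Int) : Nat → List (List Int) → Int
  | _, [] => 0
  | k, t :: ts =>
      let h : Int := if req.getD k 0 = c then 1 else 0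
      if c ∈ t then h + hitCnt req c (k + 1) ts else h

theorem stripAll_cons (c : Int) (S : List Int) (ts : List (List Int)) :
    stripAll (c :: S) ts = stripAll S (stripOne c ts) := rfl

theorem stripAll_append (S S' : List Int) (ts : List (List Int)) :
    stripAll (S ++ S') ts = stripAll S' (stripAll S ts) := by
  simp [stripAll, List.foldl_append]

theorem length_stripOne (c : Int) (ts : List (List Int)) :
    (stripOne c ts).length = ts.length := by
  induction ts with
  | nil => rfl
  | cons t ts ih => by_cases h : c ∈ t <;> simp [stripOne, h, ih]

theorem length_stripAll (S : List Int) (ts : List (List Int)) :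
    (stripAll S ts).length = ts.length := by
  induction S generalizing ts with
  | nil => rfl
  | cons d S ih => rw [stripAll_cons, ih, length_stripOne]

theorem hitCnt_nonneg (req : List Int) (c : Int) (k : Nat) (ts : List (List Int)) :
    0 ≤ hitCnt req c k ts := by
  induction ts generalizing k with
  | nil => simp [hitCnt]
  | cons t ts ih =>
      have := ih (k + 1)
      simp only [hitCnt]
      split_ifs <;> omega

theorem hitCnt_stripOne (req : List Int) (c d : Int) (hcd : c ≠ d)
    (ts : List (List Int)) (k : Nat) :
    hitCnt req c k (stripOne d ts) = hitCnt req c k ts := by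
  induction ts generalizing k with
  | nil => rfl
  | cons t ts ih =>
      by_cases hd : d ∈ t
      · simp only [stripOne, if_pos hd, hitCnt, List.mem_erase_of_ne hcd, ih]
      · simp [stripOne, hd]

theorem hitCnt_stripAll (req : List Int) (c : Int) (S : List Int) (hc : c ∉ S)
    (ts : List (List Int)) (k : Nat) :
    hitCnt req c k (stripAll S ts) = hitCnt req c k ts := by
  induction S generalizing ts with
  | nil => rfl
  | cons d S ih =>
      rw [stripAll_cons, ih (by simp_all), hitCnt_stripOne req c d (by simp_all) ts k]

theorem getD_append_len (Q : List (List Int)) (t : List Int) (ts : List (List Int)) :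
    (Q ++ t :: ts).getD Q.length [] = t := by
  induction Q with
  | nil => rfl
  | cons q Q ih => simp [ih]

theorem set_append_len (Q : List (List Int)) (t v : List Int) (ts : List (List Int)) :
    (Q ++ t :: ts).set Q.length v = Q ++ v :: ts := by
  induction Q with
  | nil => rfl
  | cons q Q ih => simp [ih]

theorem innerA_spec (req : List Int) (c : Int) :
    ∀ (ts Q : List (List Int)) (h : Int), 1 ≤ Q.length →
    innerA req c (List.range' Q.length ts.length) (Q ++ ts, h)
      = (Q ++ stripOne c ts, h + hitCnt req c (Q.length - 1) ts) := by
  intro ts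
  induction ts with
  | nil => intro Q h hQ; simp [innerA, stripOne, hitCnt]
  | cons t ts ih =>
      intro Q h hQ
      rw [show (t :: ts).length = ts.length + 1 from rfl, List.range'_succ]
      simp only [innerA, getD_append_len]
      by_cases hc : c ∈ t
      · rw [if_pos hc, set_append_len]
        have h2 := ih (Q ++ [t.erase c]) (if req.getD (Q.length - 1) 0 = c then h + 1 else h)
          (by simp)
        simp only [List.length_append, List.length_cons, List.length_nil, Nat.zero_add,
          List.append_assoc, List.cons_append, List.nil_append, Nat.add_sub_cancel] at h2
        rw [h2]
        simp only [stripOne, if_pos hc]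
        refine congrArg₂ Prod.mk rfl ?_
        show _ = h + hitCnt req c (Q.length - 1) (t :: ts)
        simp only [hitCnt, if_pos hc]
        have hq1 : Q.length - 1 + 1 = Q.length := by omega
        rw [hq1]
        split_ifs <;> omega
      · rw [if_neg hc]
        simp only [stripOne, if_neg hc, hitCnt]
        refine congrArg₂ Prod.mk rfl ?_
        split_ifs <;> omega

theorem hitCnt_pos_iff_scan (C : List (List Int)) (req : List Int) (c : Int) :
    ∀ k, k < C.length → c ∈ C.getD k [] →
    (hitCnt req c k (C.drop (k + 1)) ≠ 0 ↔ scanB C req c k = true) := by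
  intro k
  induction hn : C.length - k using Nat.strong_induction_on generalizing k with
  | _ n ih =>
  intro hk hc
  rw [scanB]
  by_cases h2 : k + 2 ≤ C.length
  · have hk1 : k + 1 < C.length := by omega
    have hdrop : C.drop (k + 1) = C[k + 1] :: C.drop (k + 2) :=
      List.drop_eq_getElem_cons hk1
    have hgd : C.getD (k + 1) [] = C[k + 1] := List.getD_eq_getElem C [] hk1
    rw [dif_pos ⟨h2, hc⟩, hdrop]
    by_cases hm : c ∈ C[k + 1]
    · have hih := ih (C.length - (k + 1)) (by omega) (k + 1) rfl hk1 (by rw [hgd]; exact hm)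
      simp only [hitCnt, if_pos hm]
      have hnn := hitCnt_nonneg req c (k + 1) (C.drop (k + 2))
      split_ifs with hr
      · simp only [iff_true]
        omega
      · simpa using hih
    · simp only [hitCnt, if_neg hm]
      have hscan : scanB C req c (k + 1) = false := by
        rw [scanB]
        rw [dif_neg]
        intro hcon
        exact hm (hgd ▸ hcon.2)
      split_ifs with hr
      · simp
      · simp [hscan]
  · have : C.length ≤ k + 1 := by omega
    rw [List.drop_eq_nil_of_le this, dif_neg (by omega)]
    simp [hitCnt]

theorem stripOne_comm (c d : Int) (ts : List (List Int)) :
    stripOne c (stripOne d ts) = stripOne d (stripOne c ts) := by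
  by_cases hcd : c = d
  · rw [hcd]
  · induction ts with
    | nil => rfl
    | cons t ts ih =>
        by_cases hd : d ∈ t <;> by_cases hcx : c ∈ t
        · have h1 : c ∈ t.erase d := List.mem_erase_of_ne hcd |>.mpr hcx
          have h2 : d ∈ t.erase c := List.mem_erase_of_ne (Ne.symm hcd) |>.mpr hd
          simp only [stripOne, if_pos hd, if_pos hcx, if_pos h1, if_pos h2, ih,
            List.erase_comm]
        · have h1 : c ∉ t.erase d := fun hmem => hcx (List.mem_of_mem_erase hmem)
          simp only [stripOne, if_pos hd, if_neg hcx, if_neg h1, if_pos hd]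
        · have h2 : d ∉ t.erase c := fun hmem => hd (List.mem_of_mem_erase hmem)
          simp only [stripOne, if_neg hd, if_pos hcx, if_neg h2, if_pos hcx]
        · simp only [stripOne, if_neg hd, if_neg hcx]

theorem stripAll_perm {S S' : List Int} (p : S.Perm S') (ts : List (List Int)) :
    stripAll S ts = stripAll S' ts := by
  induction p generalizing ts with
  | nil => rfl
  | cons x _ ih => rw [stripAll_cons, stripAll_cons, ih]
  | swap x y l => rw [stripAll_cons, stripAll_cons, stripAll_cons, stripAll_cons,
      stripOne_comm]
  | trans _ _ ih1 ih2 => rw [ih1, ih2]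

theorem stripAll_head (S : List Int) (t : List Int) (ts : List (List Int))
    (hS : S.Nodup) (ht : t.Nodup) :
    stripAll S (t :: ts)
      = t.filter (fun x => decide (x ∉ S)) :: stripAll (S.filter (· ∈ t)) ts := by
  induction S generalizing t ts with
  | nil => simp [stripAll]
  | cons d S ih =>
      have hdS : d ∉ S := (List.nodup_cons.mp hS).1
      have hS' : S.Nodup := (List.nodup_cons.mp hS).2
      rw [stripAll_cons]
      by_cases hd : d ∈ t
      · rw [show stripOne d (t :: ts) = t.erase d :: stripOne d ts from by
          simp [stripOne, hd]]
        rw [ih (t.erase d) (stripOne d ts) hS' (ht.erase d)]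
        refine congrArg₂ _ ?_ ?_
        · rw [ht.erase_eq_filter d, List.filter_filter]
          apply List.filter_congr
          intro x hx
          by_cases hxd : x = d <;> by_cases hxS : x ∈ S <;> simp [hxd, hxS]
        · rw [show List.filter (· ∈ t) (d :: S) = d :: List.filter (· ∈ t) S from by
            simp [hd], stripAll_cons]
          congr 1
          apply List.filter_congr
          intro x hx
          have hxd : x ≠ d := fun he => hdS (he ▸ hx)
          simp [List.mem_erase_of_ne hxd]
      · rw [show stripOne d (t :: ts) = t :: ts from by simp [stripOne, hd]]
        rw [ih t ts hS' ht]
        refine congrArg₂ _ ?_ ?_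
        · apply List.filter_congr
          intro x hx
          have hxd : x ≠ d := fun he => hd (he ▸ hx)
          simp [hxd]
        · congr 1
          simp [hd]

theorem setLoopA_spec (C : List (List Int)) (req : List Int) (i : Nat) (hi : i + 1 ≤ C.length) :
    ∀ (cs S : List Int) (Q : List (List Int)) (hit miss : Int),
    Q.length = i + 1 → cs.Nodup →
    (∀ c ∈ cs, c ∉ S ∧ c ∈ C.getD i []) →
    setLoopA req C.length i cs (Q ++ stripAll S (C.drop (i + 1)), hit, miss)
      = (Q ++ stripAll (S ++ cs) (C.drop (i + 1)),
         cs.foldl (fun acc c => if scanB C req c i then (acc.1 + 1, acc.2) else (acc.1, acc.2 + 1)) (hit, miss)) := by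
  intro cs
  induction cs with
  | nil => intro S Q hit miss hQ hnd hmem; simp [setLoopA]
  | cons c cs ih =>
      intro S Q hit miss hQ hnd hmem
      have hcS : c ∉ S := (hmem c (by simp)).1
      have hcC : c ∈ C.getD i [] := (hmem c (by simp)).2
      simp only [setLoopA]
      have hlen : C.length - (i + 1) = (stripAll S (C.drop (i + 1))).length := by
        rw [length_stripAll, List.length_drop]
      have hinner := innerA_spec req c (stripAll S (C.drop (i + 1))) Q 0 (by omega)
      rw [hQ] at hinner
      simp only [Nat.add_sub_cancel] at hinner
      rw [hlen, hinner, hitCnt_stripAll req c S hcS]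
      have hstrip : stripOne c (stripAll S (C.drop (i + 1)))
          = stripAll (S ++ [c]) (C.drop (i + 1)) := by
        rw [stripAll_append]; rfl
      have hmem' : ∀ c' ∈ cs, c' ∉ S ++ [c] ∧ c' ∈ C.getD i [] := by
        intro c' hc'
        refine ⟨?_, (hmem c' (by simp [hc'])).2⟩
        have h1 : c' ∉ S := (hmem c' (by simp [hc'])).1
        have h2 : c' ≠ c := fun he => (List.nodup_cons.mp hnd).1 (he ▸ hc')
        simp [h1, h2]
      have hrec := ih (S ++ [c]) Q hit miss hQ (List.nodup_cons.mp hnd).2 hmem'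
      by_cases hs : scanB C req c i = true
      · have hpos : 0 + hitCnt req c i (C.drop (i + 1)) ≠ 0 := by
          have := (hitCnt_pos_iff_scan C req c i (by omega) hcC).mpr hs
          omega
        rw [if_pos hpos]
        simp only [hstrip]
        rw [ih (S ++ [c]) Q (hit + 1) miss hQ (List.nodup_cons.mp hnd).2 hmem']
        simp [List.append_assoc, hs]
      · have hzero : ¬(0 + hitCnt req c i (C.drop (i + 1)) ≠ 0) := by
          have h0 : hitCnt req c i (C.drop (i + 1)) = 0 := by
            by_contra hne
            exact hs ((hitCnt_pos_iff_scan C req c i (by omega) hcC).mp hne)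
          omega
        rw [if_neg hzero]
        simp only [hstrip]
        rw [ih (S ++ [c]) Q hit (miss + 1) hQ (List.nodup_cons.mp hnd).2 hmem']
        simp [List.append_assoc, hs]

theorem foldl_filter_skip (C : List (List Int)) (req : List Int) (j : Nat) (prev : List Int) :
    ∀ (cur : List Int) (acc : Int × Int),
    cur.foldl (fun acc c =>
        if c ∈ prev then acc
        else if scanB C req c j then (acc.1 + 1, acc.2) else (acc.1, acc.2 + 1)) acc
      = (cur.filter (fun c => decide (c ∉ prev))).foldl
          (fun acc c => if scanB C req c j then (acc.1 + 1, acc.2) else (acc.1, acc.2 + 1)) acc := by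
  intro cur
  induction cur with
  | nil => intro acc; rfl
  | cons c cur ih =>
      intro acc
      by_cases hc : c ∈ prev <;> simp [hc, ih]

theorem outerA_spec (C : List (List Int)) (req : List Int) (hC : ∀ s ∈ C, s.Nodup) :
    ∀ (n i : Nat) (prev : List Int) (P : List (List Int)) (hit miss : Int),
    i + n = C.length → P.length = i → prev.Nodup →
    (outerA req C.length (List.range' i n) (P ++ stripAll prev (C.drop i), hit, miss)).2
      = goB C req prev i (C.drop i) (hit, miss) := by
  intro n
  induction n with
  | zero =>
      intro i prev P hit miss hin hP hprev
      have hi : i = C.length := by omega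
      subst hi
      rw [List.drop_length]
      rfl
  | succ n ih =>
      intro i prev P hit miss hin hP hprev
      have hi : i < C.length := by omega
      have hdrop : C.drop i = C[i] :: C.drop (i + 1) := List.drop_eq_getElem_cons hi
      have hcurnd : C[i].Nodup := hC _ (List.getElem_mem hi)
      have hgd : C.getD i [] = C[i] := List.getD_eq_getElem C [] hi
      rw [List.range'_succ, hdrop, stripAll_head prev (C[i]) (C.drop (i + 1)) hprev hcurnd]
      simp only [outerA]
      have hget : (P ++ C[i].filter (fun x => decide (x ∉ prev))
            :: stripAll (prev.filter (· ∈ C[i])) (C.drop (i + 1))).getD i []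
          = C[i].filter (fun x => decide (x ∉ prev)) := by
        have hget0 := getD_append_len P (C[i].filter (fun x => decide (x ∉ prev)))
          (stripAll (prev.filter (· ∈ C[i])) (C.drop (i + 1)))
        rw [hP] at hget0
        exact hget0
      rw [hget]
      have hsplit : P ++ C[i].filter (fun x => decide (x ∉ prev))
            :: stripAll (prev.filter (· ∈ C[i])) (C.drop (i + 1))
          = (P ++ [C[i].filter (fun x => decide (x ∉ prev))])
            ++ stripAll (prev.filter (· ∈ C[i])) (C.drop (i + 1)) := by simp
      rw [hsplit]
      have hmem' : ∀ c ∈ C[i].filter (fun x => decide (x ∉ prev)),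
          c ∉ prev.filter (· ∈ C[i]) ∧ c ∈ C.getD i [] := by
        intro c hc
        rw [List.mem_filter] at hc
        have hcp : c ∉ prev := by simpa using hc.2
        exact ⟨fun hmem => hcp (List.mem_filter.mp hmem).1, hgd ▸ hc.1⟩
      rw [setLoopA_spec C req i (by omega) (C[i].filter (fun x => decide (x ∉ prev)))
        (prev.filter (· ∈ C[i])) (P ++ [C[i].filter (fun x => decide (x ∉ prev))]) hit miss
        (by simp [hP]) (hcurnd.filter _) hmem']
      have hperm : List.Perm
          (prev.filter (· ∈ C[i]) ++ C[i].filter (fun x => decide (x ∉ prev))) (C[i]) := by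
        have h1 : List.Perm (prev.filter (· ∈ C[i])) (C[i].filter (· ∈ prev)) := by
          refine (List.perm_ext_iff_of_nodup (hprev.filter _) (hcurnd.filter _)).mpr ?_
          intro a
          simp only [List.mem_filter, decide_eq_true_eq]
          exact and_comm
        have h2 : C[i].filter (fun x => decide (x ∉ prev))
            = C[i].filter (fun x => !(· ∈ prev) x) := by
          apply List.filter_congr
          intro x _
          simp
        exact (h1.append_right _).trans (h2 ▸ List.filter_append_perm (· ∈ prev) (C[i]))
      rw [stripAll_perm hperm]
      have hih := ih (i + 1) (C[i]) (P ++ [C[i].filter (fun x => decide (x ∉ prev))])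
        (List.foldl (fun acc c => if scanB C req c i = true then (acc.1 + 1, acc.2)
          else (acc.1, acc.2 + 1)) (hit, miss) (C[i].filter (fun x => decide (x ∉ prev)))).1
        (List.foldl (fun acc c => if scanB C req c i = true then (acc.1 + 1, acc.2)
          else (acc.1, acc.2 + 1)) (hit, miss) (C[i].filter (fun x => decide (x ∉ prev)))).2
        (by omega) (by simp [hP]) hcurnd
      rw [show ((List.foldl (fun acc c => if scanB C req c i = true then (acc.1 + 1, acc.2)
          else (acc.1, acc.2 + 1)) (hit, miss) (C[i].filter (fun x => decide (x ∉ prev)))).1,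
          (List.foldl (fun acc c => if scanB C req c i = true then (acc.1 + 1, acc.2)
          else (acc.1, acc.2 + 1)) (hit, miss) (C[i].filter (fun x => decide (x ∉ prev)))).2)
          = List.foldl (fun acc c => if scanB C req c i = true then (acc.1 + 1, acc.2)
          else (acc.1, acc.2 + 1)) (hit, miss) (C[i].filter (fun x => decide (x ∉ prev)))
          from rfl] at hih
      rw [hih]
      show _ = goB C req prev i (C[i] :: C.drop (i + 1)) (hit, miss)
      simp only [goB]
      rw [foldl_filter_skip C req i prev (C[i]) (hit, miss)]

-- ===== VERDICT (by name: the statement is the Claim_ definition above) =====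
theorem lifetimeEvaluate_spec : Claim_equal_lifetimeEvaluate := by
  intro C req _ hpre
  unfold Spec_lifetimeEvaluate lifetimeEvaluate lifetimeEvaluate_alt
  have h := outerA_spec C req hpre.1 C.length 0 [] [] 0 0 (by omega) rfl List.nodup_nil
  have hs : stripAll [] C = C := rfl
  simp only [List.drop_zero, List.nil_append, hs] at h
  rw [List.range_eq_range']
  rw [← h]
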